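-- pv_equiv track=rewrite | github.com/Derek-94/Python_solution_code | opensurvey/3.py | solution
-- ===== SOURCE A (Python) =====
-- from collections import deque;
--
-- def solution(N, coffee_times):
--     answer = [];
--     process_deq = deque();
--
--     if N == 1:
--         return [i for i in range(1, len(coffee_times) + 1)];
--
--     coffee_times_en = deque();
--     for index, ele in enumerate(coffee_times):
--         coffee_times_en.append((index + 1, ele));
--
--     while len(answer) < len(coffee_times):
--         while len(coffee_times_en) and len(process_deq) < N:
--             process_deq.append(coffee_times_en.popleft());
--
--         tmp_dep = deque();
--
--         for index, time in process_deq: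
--             tmp_dep.append((index, time - 1));
--
--         process_deq.clear();
--         for index, time in tmp_dep:
--             if time > 0:
--                 process_deq.append((index, time));
--             else:
--                 answer.append(index);
--
--     return answer
-- ===== SOURCE B (Python) =====
-- def solution(N, coffee_times):
--     # Greedy per-item scheduling on server free-times instead of per-tick simulation:
--     # each ticket takes the earliest-free server; finish time = free + max(t, 1).
--     # Answer = ticket numbers sorted by (finish time, ticket number).
--     free = [0] * min(N, len(coffee_times))
--     events = []
--     for k, t in enumerate(coffee_times, 1):
--         m = min(free)
--         free.remove(m)
--         f = m + max(t, 1)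
--         free.append(f)
--         events.append((f, k))
--     events.sort()
--     return [i for _, i in events]
-- ===== Notes on version B (the rewrite author's own statement) =====
-- stated objective: faster
-- what changed: A simulates every time tick, decrementing each running ticket by 1 per tick; B never simulates time at all: it assigns each ticket greedily to the earliest-free server (finish = free + max(t,1)), then sorts the (finish, ticket) events, so work depends on the number of tickets, not on the simulated time span.
import Mathlib
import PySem

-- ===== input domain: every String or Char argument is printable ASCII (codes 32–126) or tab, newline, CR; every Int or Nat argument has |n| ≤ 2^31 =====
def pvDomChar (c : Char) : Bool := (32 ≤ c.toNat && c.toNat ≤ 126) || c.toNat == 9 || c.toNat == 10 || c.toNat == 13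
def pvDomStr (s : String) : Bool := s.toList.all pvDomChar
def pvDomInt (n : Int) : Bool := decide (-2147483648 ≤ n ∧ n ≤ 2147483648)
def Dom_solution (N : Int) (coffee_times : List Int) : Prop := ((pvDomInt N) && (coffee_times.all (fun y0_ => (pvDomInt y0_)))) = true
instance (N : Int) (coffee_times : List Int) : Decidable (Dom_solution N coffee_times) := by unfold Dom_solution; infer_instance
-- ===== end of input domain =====

-- B replaces A's per-tick simulation by greedy scheduling: each ticket takes the
-- earliest-free server (finish = free + max(t,1)); the (finish, ticket) events are
-- then sorted. No time tick is ever simulated.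

-- ===== PORT A =====
-- A's `for index, ele in enumerate(coffee_times): …append((index+1, ele))`
def enumA (k : Int) : List Int → List (Int × Int)
  | [] => []
  | t :: ts => (k, t) :: enumA (k + 1) ts

-- A's inner `while len(coffee_times_en) and len(process_deq) < N:` refill loop
def refillA (N : Int) : List (Int × Int) → List (Int × Int) → List (Int × Int) × List (Int × Int)
  | [], p => ([], p)
  | x :: q, p => if (p.length : Int) < N then refillA N q (p ++ [x]) else (x :: q, p)

-- A's outer `while len(answer) < len(coffee_times)` loop; fuel only makes it total
-- (it runs out exactly where the Python loops forever, i.e. outside Pre_solution)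
def loopA (N : Int) (M : Nat) : Nat → List (Int × Int) → List (Int × Int) → List Int → List Int
  | 0, _, _, ans => ans
  | fuel + 1, q, p, ans =>
    if ans.length < M then
      let r := refillA N q p
      let tmp := r.2.map (fun it => (it.1, it.2 - 1))
      let s := tmp.foldl
        (fun acc it => if 0 < it.2 then (acc.1 ++ [it], acc.2) else (acc.1, acc.2 ++ [it.1]))
        ([], [])
      loopA N M fuel r.1 s.1 (ans ++ s.2)
    else ans

def solution (N : Int) (coffee_times : List Int) : List Int :=
  if N == 1 then PySem.List.pyRange 1 ((coffee_times.length : Int) + 1) 1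
  else
    loopA N coffee_times.length
      ((coffee_times.map (fun t => (max t 1).toNat)).sum + 1)
      (enumA 1 coffee_times) [] []

-- ===== PORT B =====
-- Source B's per-ticket loop: m = min(free); free.remove(m); free.append(m + max(t,1));
-- events.append((m + max(t,1), k)).  `min([])` raises ValueError in Python (only
-- reachable with N ≤ 0 and a nonempty list, outside Pre_solution): `none` branch.
def schedB : List Int → Int → List Int → List (Int × Int)
  | _, _, [] => []
  | free, k, t :: rest =>
    match PySem.List.min? free (fun x => x) with
    | none => []
    | some m =>
      (m + max t 1, k) ::
        schedB ((PySem.List.remove? free m).getD [] ++ [m + max t 1]) (k + 1) rest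

-- Source B: free = [0] * min(N, len(coffee_times)); events.sort() compares Python tuples
-- lexicographically, ported as a sort keyed by the lexicographic order on pairs.
def solution_alt (N : Int) (coffee_times : List Int) : List Int :=
  (PySem.List.sorted
      (schedB (List.replicate (min N (coffee_times.length : Int)).toNat 0) 1 coffee_times)
      (fun e => toLex e)).map Prod.snd

-- ===== PRECONDITION & SPEC =====
-- A loops forever when N ≤ 0 and the list is nonempty (no slot ever opens, B raises
-- ValueError there too); Pre_ excludes exactly that.
def Pre_solution (N : Int) (coffee_times : List Int) : Prop := 1 ≤ N ∨ coffee_times = []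
instance (N : Int) (coffee_times : List Int) : Decidable (Pre_solution N coffee_times) := by
  unfold Pre_solution; infer_instance

def pvWitness_solution : Int × List Int := (2, [3, 1, 2, 1])

def Spec_solution (N : Int) (coffee_times : List Int) (out : List Int) : Prop := out = solution_alt N coffee_times
instance (N : Int) (coffee_times : List Int) (out : List Int) : Decidable (Spec_solution N coffee_times out) := by unfold Spec_solution; infer_instance

-- ===== CLAIM (what is proved, stated in full; the proofs are below) =====
def Claim_equal_solution : Prop := ∀ (N : Int) (coffee_times : List Int), Dom_solution N coffee_times → Pre_solution N coffee_times → Spec_solution N coffee_times (solution N coffee_times)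

-- ===== LEMMAS AND PROOFS =====

-- the survivors of an m-tick jump, and the items finishing during it (in batch order)
def survJ (m : Int) (p : List (Int × Int)) : List (Int × Int) :=
  (p.filter (fun it => !decide (it.2 ≤ m))).map (fun it => (it.1, it.2 - m))

def finJ (m : Int) (p : List (Int × Int)) : List Int :=
  (p.filter (fun it => decide (it.2 ≤ m))).map Prod.fst

def sumE (p : List (Int × Int)) : Nat := (p.map (fun it => (max it.2 1).toNat)).sum

-- proof-side event-driven view of A's loop: jump m = min remaining ticks at once,
-- recording (absolute finish time, index) pairs
def evLoop (N : Int) (M : Nat) : Nat → Int → List (Int × Int) → List (Int × Int) → List (Int × Int) → List (Int × Int)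
  | 0, _, _, _, acc => acc
  | fuel + 1, T, q, p, acc =>
    if acc.length < M then
      let r := refillA N q p
      match PySem.List.min? (r.2.map (fun it => max it.2 1)) (fun x => x) with
      | none => acc
      | some m => evLoop N M fuel (T + m) r.1 (survJ m r.2) (acc ++ (finJ m r.2).map (fun i => (T + m, i)))
    else acc

theorem refillA_shape (N : Int) (q p : List (Int × Int)) :
    ∃ k, refillA N q p = (q.drop k, p ++ q.take k) := by
  induction q generalizing p with
  | nil => exact ⟨0, by simp [refillA]⟩
  | cons x q ih =>
    simp only [refillA]
    split
    · obtain ⟨k, hk⟩ := ih (p ++ [x])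
      exact ⟨k + 1, by simpa using hk⟩
    · exact ⟨0, by simp⟩

theorem refillA_noop (N : Int) (q p : List (Int × Int))
    (h : q = [] ∨ ¬ ((p.length : Int) < N)) : refillA N q p = (q, p) := by
  rcases h with h | h
  · subst h; rfl
  · cases q with
    | nil => rfl
    | cons x q => simp [refillA, h]

theorem refillA_post (N : Int) (q p : List (Int × Int)) :
    (refillA N q p).1 = [] ∨ ¬ (((refillA N q p).2.length : Int) < N) := by
  induction q generalizing p with
  | nil => simp [refillA]
  | cons x q ih =>
    simp only [refillA]
    split
    · exact ih (p ++ [x])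
    · right; assumption

theorem refillA_le (N : Int) (q p : List (Int × Int)) (h : (p.length : Int) ≤ N) :
    (((refillA N q p).2.length : Int)) ≤ N := by
  induction q generalizing p with
  | nil => simpa [refillA]
  | cons x q ih =>
    simp only [refillA]
    split
    · exact ih (p ++ [x]) (by simp; omega)
    · simpa

theorem refillA_nonempty (N : Int) (q p : List (Int × Int)) (hN : 1 ≤ N)
    (h : ¬ (q = [] ∧ p = [])) : (refillA N q p).2 ≠ [] := by
  induction q generalizing p with
  | nil =>
    simp only [refillA]
    intro hp
    exact h ⟨rfl, hp⟩
  | cons x q ih =>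
    simp only [refillA]
    split
    · apply ih
      simp
    · intro hp
      subst hp
      simp at *
      omega

theorem splitA_gen (p : List (Int × Int)) (a : List (Int × Int)) (b : List Int) :
    p.foldl (fun acc it => if 0 < it.2 then (acc.1 ++ [it], acc.2) else (acc.1, acc.2 ++ [it.1])) (a, b)
      = (a ++ p.filter (fun it => decide (0 < it.2)),
         b ++ (p.filter (fun it => !decide (0 < it.2))).map Prod.fst) := by
  induction p generalizing a b with
  | nil => simp
  | cons x p ih => by_cases h : 0 < x.2 <;> simp [h, ih]

theorem tmp_keep (p : List (Int × Int)) :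
    (p.map (fun it => (it.1, it.2 - 1))).filter (fun it => decide (0 < it.2)) = survJ 1 p := by
  induction p with
  | nil => rfl
  | cons x p ih =>
    by_cases h : x.2 ≤ 1
    · have h1 : ¬ (0 < x.2 - 1) := by omega
      simp only [survJ, List.map_cons, List.filter_cons] at *
      simp only [h, h1, decide_true, decide_false, Bool.not_true]
      simpa [survJ] using ih
    · have h1 : 0 < x.2 - 1 := by omega
      simp only [survJ, List.map_cons, List.filter_cons] at *
      simp only [h, h1, decide_true, decide_false, Bool.not_false]
      simpa [survJ] using ih

theorem tmp_out (p : List (Int × Int)) :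
    ((p.map (fun it => (it.1, it.2 - 1))).filter (fun it => !decide (0 < it.2))).map Prod.fst
      = finJ 1 p := by
  induction p with
  | nil => rfl
  | cons x p ih =>
    by_cases h : x.2 ≤ 1
    · have h1 : ¬ (0 < x.2 - 1) := by omega
      simp only [finJ, List.map_cons, List.filter_cons] at *
      simp only [h, h1, decide_true, decide_false]
      simpa [finJ] using ih
    · have h1 : 0 < x.2 - 1 := by omega
      simp only [finJ, List.map_cons, List.filter_cons] at *
      simp only [h, h1, decide_true, decide_false]
      simpa [finJ] using ih

-- one tick of A, expressed through survJ/finJ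
theorem tickA_step (N : Int) (M : Nat) (fuel : Nat) (q p : List (Int × Int)) (ans : List Int)
    (h : ans.length < M) :
    loopA N M (fuel + 1) q p ans
      = loopA N M fuel (refillA N q p).1 (survJ 1 (refillA N q p).2)
          (ans ++ finJ 1 (refillA N q p).2) := by
  simp only [loopA, if_pos h, splitA_gen, List.nil_append, tmp_keep, tmp_out]

theorem survJ_dec (m : Int) (p : List (Int × Int)) :
    survJ m (p.map (fun it => (it.1, it.2 - 1))) = survJ (m + 1) p := by
  induction p with
  | nil => rfl
  | cons x p ih =>
    by_cases h : x.2 ≤ m + 1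
    · have h1 : x.2 - 1 ≤ m := by omega
      simp only [survJ, List.map_cons, List.filter_cons] at *
      simp [h, h1, ih]
    · have h1 : ¬ (x.2 - 1 ≤ m) := by omega
      simp only [survJ, List.map_cons, List.filter_cons] at *
      simp [h, h1, ih]
      omega

theorem finJ_dec (m : Int) (p : List (Int × Int)) :
    finJ m (p.map (fun it => (it.1, it.2 - 1))) = finJ (m + 1) p := by
  induction p with
  | nil => rfl
  | cons x p ih =>
    by_cases h : x.2 ≤ m + 1
    · have h1 : x.2 - 1 ≤ m := by omega
      simp only [finJ, List.map_cons, List.filter_cons] at *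
      simp [h, h1, ih]
    · have h1 : ¬ (x.2 - 1 ≤ m) := by omega
      simp only [finJ, List.map_cons, List.filter_cons] at *
      simp [h, h1, ih]

-- m ticks of A collapse to one jump when m is a lower bound of the batch
theorem ticksA (N : Int) (M : Nat) :
    ∀ (m fuel : Nat) (q p q' p' : List (Int × Int)) (ans : List Int),
    1 ≤ m →
    refillA N q p = (q', p') →
    (∀ it ∈ p', (m : Int) ≤ max it.2 1) →
    ans.length < M →
    loopA N M (fuel + m) q p ans
      = loopA N M fuel q' (survJ (m : Int) p') (ans ++ finJ (m : Int) p') := by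
  intro m
  induction m with
  | zero =>
    intro fuel q p q' p' ans hm
    omega
  | succ m ih =>
    intro fuel q p q' p' ans hm hre hall hans
    by_cases hm0 : m = 0
    · subst hm0
      rw [show fuel + 1 = fuel + 1 by rfl, tickA_step N M fuel q p ans hans, hre]
      norm_num
    · have hm1 : 1 ≤ m := by omega
      have h2 : ∀ it ∈ p', 2 ≤ it.2 := by
        intro it hit
        have hc := hall it hit
        rcases le_total it.2 1 with h | h
        · rw [max_eq_right h] at hc; omega
        · rw [max_eq_left h] at hc; omega
      rw [show fuel + (m + 1) = (fuel + m) + 1 by omega,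
        tickA_step N M (fuel + m) q p ans hans, hre]
      have hfilt : p'.filter (fun it => !decide (it.2 ≤ (1 : Int))) = p' := by
        rw [List.filter_eq_self]
        intro a ha
        have := h2 a ha
        simp
        omega
      have hs1 : survJ 1 p' = p'.map (fun it => (it.1, it.2 - 1)) := by
        rw [survJ, hfilt]
      have hf1 : finJ 1 p' = [] := by
        rw [finJ, List.filter_eq_nil_iff.mpr, List.map_nil]
        intro a ha
        have := h2 a ha
        simp
        omega
      rw [hs1, hf1, List.append_nil]
      have hpost := refillA_post N q p
      rw [hre] at hpost
      have hre' : refillA N q' (p'.map (fun it => (it.1, it.2 - 1)))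
          = (q', p'.map (fun it => (it.1, it.2 - 1))) := by
        apply refillA_noop
        simpa using hpost
      have hall' : ∀ it ∈ p'.map (fun it => (it.1, it.2 - 1)), (m : Int) ≤ max it.2 1 := by
        intro it hit
        obtain ⟨x, hx, rfl⟩ := List.mem_map.mp hit
        have h2x := h2 x hx
        have hax := hall x hx
        rw [max_eq_left (by omega : (1 : Int) ≤ x.2)] at hax
        rw [max_eq_left (by omega : (1 : Int) ≤ x.2 - 1)]
        push_cast at hax ⊢
        omega
      rw [ih fuel q' (p'.map (fun it => (it.1, it.2 - 1))) q'
        (p'.map (fun it => (it.1, it.2 - 1))) ans hm1 hre' hall' hans,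
        survJ_dec, finJ_dec]
      norm_num

theorem sumE_append (a b : List (Int × Int)) : sumE (a ++ b) = sumE a + sumE b := by
  simp [sumE]

theorem mem_le_sumE (l : List (Int × Int)) (it : Int × Int) (h : it ∈ l) :
    (max it.2 1).toNat ≤ sumE l := by
  induction l with
  | nil => cases h
  | cons x l ih =>
    rcases List.mem_cons.mp h with rfl | h
    · simp [sumE]
    · have := ih h
      simp [sumE] at *
      omega

theorem sumE_map_sub_le (m : Int) (hm : 0 ≤ m) (l : List (Int × Int)) :
    sumE (l.map (fun it => (it.1, it.2 - m))) ≤ sumE l := by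
  induction l with
  | nil => simp [sumE]
  | cons x l ih =>
    have hx : (max (x.2 - m) 1).toNat ≤ (max x.2 1).toNat :=
      Int.toNat_le_toNat (max_le_max (by omega) le_rfl)
    simp [sumE] at *
    omega

theorem sumE_filter_split (P : Int × Int → Bool) (l : List (Int × Int)) :
    sumE (l.filter P) + sumE (l.filter (fun it => !P it)) = sumE l := by
  induction l with
  | nil => rfl
  | cons x l ih =>
    by_cases h : P x <;> simp [sumE, h] at * <;> omega

theorem sumE_surv (m : Int) (hm : 1 ≤ m) (p : List (Int × Int))
    (it0 : Int × Int) (hit0 : it0 ∈ p) (hit0e : max it0.2 1 = m) :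
    sumE (survJ m p) + m.toNat ≤ sumE p := by
  have hsplit := sumE_filter_split (fun it => decide (it.2 ≤ m)) p
  have hle : sumE (survJ m p) ≤ sumE (p.filter (fun it => !decide (it.2 ≤ m))) :=
    sumE_map_sub_le m (by omega) _
  have hfin : it0 ∈ p.filter (fun it => decide (it.2 ≤ m)) := by
    refine List.mem_filter.mpr ⟨hit0, ?_⟩
    simp
    omega
  have : (max it0.2 1).toNat ≤ sumE (p.filter (fun it => decide (it.2 ≤ m))) :=
    mem_le_sumE _ _ hfin
  rw [hit0e] at this
  omega

theorem surv_fin_len (m : Int) (p : List (Int × Int)) :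
    (survJ m p).length + (finJ m p).length = p.length := by
  induction p with
  | nil => rfl
  | cons x p ih =>
    by_cases h : x.2 ≤ m <;>
      simp only [survJ, finJ, List.filter_cons, List.length_map] at * <;>
      simp [h] <;> omega

theorem finJ_ne (m : Int) (p : List (Int × Int)) (it0 : Int × Int)
    (hit0 : it0 ∈ p) (h : it0.2 ≤ m) : finJ m p ≠ [] := by
  have : it0.1 ∈ finJ m p :=
    List.mem_map_of_mem (List.mem_filter.mpr ⟨hit0, by simp; omega⟩)
  exact List.ne_nil_of_mem this

-- A's tick loop equals the event-driven view, projected to indices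
theorem mainLoop (N : Int) (M : Nat) (hN : 1 ≤ N) :
    ∀ (cnt : Nat) (q p ev : List (Int × Int)) (T : Int) (fuelA fuelB : Nat),
    q.length + p.length = cnt →
    ev.length + cnt = M →
    cnt < fuelB →
    sumE q + sumE p < fuelA →
    loopA N M fuelA q p (ev.map Prod.snd) = (evLoop N M fuelB T q p ev).map Prod.snd := by
  intro cnt
  induction cnt using Nat.strong_induction_on with
  | _ cnt ih =>
  intro q p ev T fuelA fuelB hlen hM hfB hfA
  obtain ⟨fA, rfl⟩ : ∃ fA, fuelA = fA + 1 := ⟨fuelA - 1, by omega⟩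
  obtain ⟨fB, rfl⟩ : ∃ fB, fuelB = fB + 1 := ⟨fuelB - 1, by omega⟩
  by_cases hcnt : cnt = 0
  · subst hcnt
    have hq : q = [] := List.length_eq_zero_iff.mp (by omega)
    have hp : p = [] := List.length_eq_zero_iff.mp (by omega)
    subst hq hp
    have hng : ¬ ((ev.map Prod.snd).length < M) := by simp; omega
    have hng' : ¬ (ev.length < M) := by omega
    simp [loopA, evLoop, hng']
  · have hguard : (ev.map Prod.snd).length < M := by simp; omega
    have hguardEv : ev.length < M := by omega
    obtain ⟨k, hrk⟩ := refillA_shape N q p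
    have hqtd : q.take k ++ q.drop k = q := List.take_append_drop k q
    have hlens : (q.drop k).length + (p ++ q.take k).length = cnt := by
      have := congrArg List.length hqtd
      simp at this ⊢
      omega
    have hsums : sumE (q.drop k) + sumE (p ++ q.take k) = sumE q + sumE p := by
      have := congrArg sumE hqtd
      rw [sumE_append] at this
      rw [sumE_append]
      omega
    have hp'ne : (p ++ q.take k) ≠ [] := by
      have h1 := refillA_nonempty N q p hN (by
        rintro ⟨h1, h2⟩
        subst h1 h2
        simp at hlen
        omega)
      rw [hrk] at h1
      exact h1
    cases hmin : PySem.List.min? ((p ++ q.take k).map (fun it => max it.2 1)) (fun x => x) with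
    | none =>
      exfalso
      rw [PySem.List.min?_eq_none_iff, List.map_eq_nil_iff] at hmin
      exact hp'ne hmin
    | some m =>
      have hmem := PySem.List.min?_mem hmin
      have hmins := PySem.List.min?_isMin hmin
      obtain ⟨it0, hit0, hit0e⟩ := List.mem_map.mp hmem
      have hm1 : (1 : Int) ≤ m := by rw [← hit0e]; exact le_max_right _ _
      have hmnat : ((m.toNat : Nat) : Int) = m := Int.toNat_of_nonneg (by omega)
      have hall : ∀ it ∈ (p ++ q.take k), ((m.toNat : Nat) : Int) ≤ max it.2 1 := by
        intro it hit
        rw [hmnat]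
        exact hmins _ (List.mem_map_of_mem hit)
      have hit0le : it0.2 ≤ m := by rw [← hit0e]; exact le_max_left _ _
      have hmle : m.toNat ≤ sumE q + sumE p := by
        have h1 := mem_le_sumE _ _ hit0
        rw [hit0e] at h1
        omega
      -- A: collapse m ticks into one jump
      rw [show fA + 1 = (fA + 1 - m.toNat) + m.toNat by omega,
        ticksA N M m.toNat (fA + 1 - m.toNat) q p _ _ (ev.map Prod.snd) (by omega) hrk hall hguard,
        hmnat]
      -- event view: one step
      conv_rhs => rw [evLoop]
      simp only [if_pos hguardEv, hrk, hmin]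
      -- recurse
      have hfinne := finJ_ne m (p ++ q.take k) it0 hit0 hit0le
      have hfinlen : 0 < (finJ m (p ++ q.take k)).length := List.length_pos_of_ne_nil hfinne
      have hsfl := surv_fin_len m (p ++ q.take k)
      have hsurvE := sumE_surv m hm1 (p ++ q.take k) it0 hit0 hit0e
      have hproj : ev.map Prod.snd ++ finJ m (p ++ q.take k)
          = (ev ++ (finJ m (p ++ q.take k)).map (fun i => (T + m, i))).map Prod.snd := by
        simp [List.map_map]
      rw [hproj]
      apply ih ((q.drop k).length + (survJ m (p ++ q.take k)).length) (by omega)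
      · rfl
      · simp only [List.length_append, List.length_map]
        omega
      · omega
      · have := sumE_map_sub_le m (by omega) ((p ++ q.take k).filter (fun it => !decide (it.2 ≤ m)))
        omega

-- enumeration lemmas
theorem enum_length (k : Int) (l : List Int) : (enumA k l).length = l.length := by
  induction l generalizing k with
  | nil => rfl
  | cons t ts ih => simp [enumA, ih]

theorem enum_fst (k : Int) (l : List Int) :
    (enumA k l).map Prod.fst = PySem.List.pyRange k (k + l.length) 1 := by
  induction l generalizing k with
  | nil =>
    simp only [enumA, List.map_nil, List.length_nil, Nat.cast_zero, add_zero]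
    rw [PySem.List.pyRange_one_eq_nil le_rfl]
  | cons t ts ih =>
    have hlen : k + (((t :: ts).length : Nat) : Int) = (k + 1) + ((ts.length : Nat) : Int) := by
      push_cast [List.length_cons]; ring
    rw [hlen, PySem.List.pyRange_one_cons
      (show k < (k + 1) + ((ts.length : Nat) : Int) by omega)]
    simp only [enumA, List.map_cons]
    rw [ih (k + 1)]

theorem sumE_enum (k : Int) (l : List Int) :
    sumE (enumA k l) = (l.map (fun t => (max t 1).toNat)).sum := by
  induction l generalizing k with
  | nil => rfl
  | cons t ts ih => simp [sumE, enumA] at *; simp [ih]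

theorem enumA_take (k : Int) (j : Nat) (l : List Int) :
    (enumA k l).take j = enumA k (l.take j) := by
  induction l generalizing k j with
  | nil => simp [enumA]
  | cons t ts ih =>
    cases j with
    | zero => simp [enumA]
    | succ j => simp [enumA, ih]

theorem enumA_drop (k : Int) (j : Nat) (l : List Int) :
    (enumA k l).drop j = enumA (k + (j : Int)) (l.drop j) := by
  induction l generalizing k j with
  | nil => simp [enumA]
  | cons t ts ih =>
    cases j with
    | zero => simp [enumA]
    | succ j =>
      simp only [enumA, List.drop_succ_cons, ih (k + 1) j]
      congr 1
      push_cast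
      ring

theorem enumA_lb (k : Int) (l : List Int) : ∀ x ∈ enumA k l, k ≤ x.1 := by
  induction l generalizing k with
  | nil => simp [enumA]
  | cons t ts ih =>
    intro x hx
    rcases List.mem_cons.mp hx with rfl | hx
    · simp
    · have := ih (k + 1) x hx
      omega

theorem enumA_fst_pairwise (k : Int) (l : List Int) :
    ((enumA k l).map Prod.fst).Pairwise (· < ·) := by
  induction l generalizing k with
  | nil => simp [enumA]
  | cons t ts ih =>
    simp only [enumA, List.map_cons, List.pairwise_cons]
    refine ⟨?_, ih (k + 1)⟩
    intro b hb
    obtain ⟨x, hx, rfl⟩ := List.mem_map.mp hb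
    have := enumA_lb (k + 1) ts x hx
    omega

-- ===== B-side lemmas =====

-- the events of one batch split into finishers (at time T+m) and survivors
theorem splitEvents (T m : Int) (hm : 1 ≤ m) (p1 : List (Int × Int))
    (hmins : ∀ it ∈ p1, m ≤ max it.2 1) :
    (p1.map (fun it => (T + max it.2 1, it.1))).Perm
      ((finJ m p1).map (fun i => (T + m, i))
        ++ (survJ m p1).map (fun it => ((T + m) + max it.2 1, it.1))) := by
  have hsplit := (List.filter_append_perm (fun it => decide (it.2 ≤ m)) p1).map
    (fun it => (T + max it.2 1, it.1))
  rw [List.map_append] at hsplit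
  refine hsplit.symm.trans (List.Perm.of_eq ?_)
  congr 1
  · rw [finJ, List.map_map]
    refine List.map_congr_left ?_
    intro it hit
    have h1 := (List.mem_filter.mp hit).2
    have h2 := hmins it (List.mem_filter.mp hit).1
    simp only [decide_eq_true_eq] at h1
    have : max it.2 1 = m := by omega
    simp [this]
  · rw [survJ, List.map_map]
    refine List.map_congr_left ?_
    intro it hit
    have h1 := (List.mem_filter.mp hit).2
    simp only [Bool.not_eq_eq_eq_not, Bool.not_true, decide_eq_false_iff_not] at h1
    have h2 : max it.2 1 = it.2 := by omega
    have h3 : max (it.2 - m) 1 = it.2 - m := by omega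
    simp only [Function.comp]
    rw [h2, h3]
    ring_nf

-- value version of splitEvents: finishers' finish times are all T+m
theorem splitVals (T m : Int) (hm : 1 ≤ m) (p1 : List (Int × Int))
    (hmins : ∀ it ∈ p1, m ≤ max it.2 1) :
    (p1.map (fun it => T + max it.2 1)).Perm
      (List.replicate (finJ m p1).length (T + m)
        ++ (survJ m p1).map (fun it => (T + m) + max it.2 1)) := by
  have h := (splitEvents T m hm p1 hmins).map Prod.fst
  rw [List.map_append, List.map_map, List.map_map, List.map_map] at h
  simp only [Function.comp_def] at h
  have h1 : (finJ m p1).map (fun _ => T + m) = List.replicate (finJ m p1).length (T + m) :=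
    List.map_const'
  rw [h1] at h
  exact h

theorem schedB_feed :
    ∀ (taken rest free B pads : List Int) (k T : Int),
    free.Perm (B ++ pads) →
    (∀ b ∈ B, T + 1 ≤ b) →
    (∀ x ∈ pads, x = T) →
    taken.length ≤ pads.length →
    ∃ free', schedB free k (taken ++ rest)
        = (enumA k taken).map (fun it => (T + max it.2 1, it.1))
            ++ schedB free' (k + (taken.length : Int)) rest
      ∧ free'.Perm ((B ++ (enumA k taken).map (fun it => T + max it.2 1))
            ++ List.replicate (pads.length - taken.length) T) := by
  intro taken
  induction taken with
  | nil =>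
    intro rest free B pads k T hperm hB hpads _
    refine ⟨free, by simp [enumA], ?_⟩
    have hrep := List.eq_replicate_of_mem hpads
    simp only [enumA, List.map_nil, List.append_nil, List.length_nil, Nat.sub_zero]
    rw [← hrep]
    exact hperm
  | cons t taken' ih =>
    intro rest free B pads k T hperm hB hpads hlen
    obtain ⟨n, hn⟩ : ∃ n, pads.length = n + 1 := ⟨pads.length - 1, by simp at hlen; omega⟩
    have hpadsrep : pads = List.replicate (n + 1) T := by
      rw [← hn]; exact List.eq_replicate_of_mem hpads
    have hTfree : T ∈ free := by
      rw [hperm.mem_iff, List.mem_append, hpadsrep]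
      right
      exact List.mem_replicate.mpr ⟨by omega, rfl⟩
    have hmin : PySem.List.min? free (fun x => x) = some T := by
      cases hm : PySem.List.min? free (fun x => x) with
      | none =>
        rw [PySem.List.min?_eq_none_iff] at hm
        subst hm
        cases hTfree
      | some m =>
        have hmem := PySem.List.min?_mem hm
        have hle := PySem.List.min?_isMin hm T hTfree
        have : m ∈ B ++ pads := hperm.mem_iff.mp hmem
        rcases List.mem_append.mp this with h | h
        · have := hB m h; omega
        · rw [hpadsrep] at h
          rw [(List.mem_replicate.mp h).2]

    have hrem : (PySem.List.remove? free T).getD [] = free.erase T := by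
      rw [PySem.List.remove?_eq_some_erase free T hTfree]
      rfl
    have hTnotB : T ∉ B := by
      intro h
      have := hB T h
      omega
    have herase : (free.erase T).Perm (B ++ List.replicate n T) := by
      have h1 := hperm.erase T
      rw [List.erase_append_right _ hTnotB, hpadsrep] at h1
      simpa using h1
    have hnew : ((free.erase T) ++ [T + max t 1]).Perm
        ((B ++ [T + max t 1]) ++ List.replicate n T) := by
      refine (herase.append_right [T + max t 1]).trans ?_
      rw [List.append_assoc, List.append_assoc]
      exact List.Perm.append_left B (List.perm_append_comm)
    obtain ⟨free', heq, hperm'⟩ := ih rest ((free.erase T) ++ [T + max t 1])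
      (B ++ [T + max t 1]) (List.replicate n T) (k + 1) T hnew
      (by intro b hb
          rcases List.mem_append.mp hb with h | h
          · exact hB b h
          · simp at h; omega)
      (by intro x hx; exact (List.mem_replicate.mp hx).2)
      (by simp at hlen ⊢; omega)
    refine ⟨free', ?_, ?_⟩
    · have hunfold : schedB free k ((t :: taken') ++ rest)
          = (T + max t 1, k) :: schedB (free.erase T ++ [T + max t 1]) (k + 1) (taken' ++ rest) := by
        rw [List.cons_append, schedB, hmin]
        show (T + max t 1, k) :: schedB ((PySem.List.remove? free T).getD [] ++ [T + max t 1])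
            (k + 1) (taken' ++ rest) = _
        rw [hrem]
      rw [hunfold, heq]
      simp only [enumA, List.map_cons, List.cons_append, List.length_cons]
      congr 3
      push_cast
      ring
    · rw [List.length_replicate] at hperm'
      refine hperm'.trans (List.Perm.of_eq ?_)
      simp only [enumA, List.map_cons, hn, List.length_cons]
      rw [List.append_assoc B, List.singleton_append]
      congr 2
      omega

-- events of the event-driven view are a permutation of B's greedy schedule
theorem evPerm (N : Int) (M : Nat) (hN : 1 ≤ N) :
    ∀ (cnt : Nat) (ts : List Int) (k T : Int) (p : List (Int × Int))
      (free : List Int) (ev : List (Int × Int)) (fuelB : Nat),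
    ts.length + p.length = cnt →
    ev.length + cnt = M →
    cnt < fuelB →
    (p.length : Int) ≤ N →
    (ts ≠ [] →
      free.length = (min N (M : Int)).toNat ∧
      ∃ pads, free.Perm (p.map (fun it => T + max it.2 1) ++ pads) ∧ (∀ x ∈ pads, x = T)) →
    (evLoop N M fuelB T (enumA k ts) p ev).Perm
      (ev ++ p.map (fun it => (T + max it.2 1, it.1)) ++ schedB free k ts) := by
  intro cnt
  induction cnt using Nat.strong_induction_on with
  | _ cnt ih =>
  intro ts k T p free ev fuelB hlen hM hfB hpN hfree
  obtain ⟨fB, rfl⟩ : ∃ fB, fuelB = fB + 1 := ⟨fuelB - 1, by omega⟩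
  by_cases hcnt : cnt = 0
  · subst hcnt
    have hts : ts = [] := List.length_eq_zero_iff.mp (by omega)
    have hp : p = [] := List.length_eq_zero_iff.mp (by omega)
    subst hts hp
    have hng : ¬ (ev.length < M) := by omega
    simp [evLoop, schedB, hng]
  · have hguard : ev.length < M := by omega
    cases ts with
    | nil =>
      -- queue empty: the remaining events are exactly p's items, schedB adds nothing
      simp only [List.length_nil] at hlen
      have hp : p ≠ [] := by intro h; subst h; simp at hlen; omega
      cases hmin : PySem.List.min? (p.map (fun it => max it.2 1)) (fun x => x) with
      | none =>
        exfalso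
        rw [PySem.List.min?_eq_none_iff, List.map_eq_nil_iff] at hmin
        exact hp hmin
      | some m =>
        obtain ⟨it0, hit0, hit0e⟩ := List.mem_map.mp (PySem.List.min?_mem hmin)
        have hmins' : ∀ it ∈ p, m ≤ max it.2 1 := fun it hit =>
          PySem.List.min?_isMin hmin _ (List.mem_map_of_mem hit)
        have hm1 : (1 : Int) ≤ m := by rw [← hit0e]; exact le_max_right _ _
        have hit0le : it0.2 ≤ m := by rw [← hit0e]; exact le_max_left _ _
        have hfinlen : 0 < (finJ m p).length :=
          List.length_pos_of_ne_nil (finJ_ne m p it0 hit0 hit0le)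
        have hsfl := surv_fin_len m p
        rw [evLoop]
        simp only [if_pos hguard, enumA, refillA, hmin]
        have hih := ih ((survJ m p).length) (by omega) [] k (T + m) (survJ m p) free
          (ev ++ (finJ m p).map (fun i => (T + m, i))) fB
          (by simp) (by simp; omega) (by omega)
          (by have : (survJ m p).length ≤ p.length := by omega
              omega)
          (by intro h; exact absurd rfl h)
        simp only [enumA] at hih
        refine hih.trans ?_
        simp only [schedB, List.append_nil]
        have hsp := splitEvents T m hm1 p hmins'
        simp only [List.append_assoc]
        refine List.Perm.append_left ev ?_
        simpa [List.append_assoc] using hsp.symm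
    | cons t ts0 =>
      simp only [List.length_cons] at hlen
      obtain ⟨hfl, pads, hperm, hpadsT⟩ := hfree (by simp)
      obtain ⟨kk, hrk⟩ := refillA_shape N (enumA k (t :: ts0)) p
      have hrk' : refillA N (enumA k (t :: ts0)) p
          = (enumA (k + (kk : Int)) ((t :: ts0).drop kk), p ++ enumA k ((t :: ts0).take kk)) := by
        rw [hrk, enumA_take, enumA_drop]
      set taken := (t :: ts0).take kk with htakendef
      set rest := (t :: ts0).drop kk with hrestdef
      set p1 := p ++ enumA k taken with hp1def
      have hta : taken ++ rest = t :: ts0 := List.take_append_drop kk (t :: ts0)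
      have hp1ne : p1 ≠ [] := by
        have h := refillA_nonempty N (enumA k (t :: ts0)) p hN
          (by rintro ⟨h1, _⟩; simp [enumA] at h1)
        rw [hrk'] at h
        exact h
      have hlentr : taken.length + rest.length = ts0.length + 1 := by
        have := congrArg List.length hta
        simp only [List.length_append, List.length_cons] at this
        omega
      have hp1len : p1.length = p.length + taken.length := by
        simp [hp1def, enum_length]
      have hp1N : (p1.length : Int) ≤ N := by
        have h := refillA_le N (enumA k (t :: ts0)) p hpN
        rw [hrk'] at h
        simpa using h
      have hflInt : (free.length : Int) = min N (M : Int) := by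
        rw [hfl]
        exact Int.toNat_of_nonneg (le_min (by omega) (by omega))
      have hpadslen : free.length = p.length + pads.length := by
        have := hperm.length_eq
        simpa using this
      have hcntM : cnt ≤ M := by omega
      have hfree_ge : (p1.length : Int) ≤ (free.length : Int) := by
        rcases le_total N ((M : Nat) : Int) with h | h
        · rw [min_eq_left h] at hflInt; omega
        · rw [min_eq_right h] at hflInt
          have h1 : p1.length ≤ cnt := by
            rw [hp1len]
            simp only [← hlen]
            omega
          omega
      have htklepads : taken.length ≤ pads.length := by
        have h1 : (taken.length : Int) = (p1.length : Int) - (p.length : Int) := by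
          rw [hp1len]; push_cast; ring
        have h2 : (pads.length : Int) = (free.length : Int) - (p.length : Int) := by
          rw [hpadslen]; push_cast; ring
        omega
      obtain ⟨free', heq, hperm'⟩ := schedB_feed taken rest free
        (p.map (fun it => T + max it.2 1)) pads k T hperm
        (by intro b hb
            obtain ⟨it, _, rfl⟩ := List.mem_map.mp hb
            have := le_max_right it.2 1
            omega)
        hpadsT htklepads
      cases hmin : PySem.List.min? (p1.map (fun it => max it.2 1)) (fun x => x) with
      | none =>
        exfalso
        rw [PySem.List.min?_eq_none_iff, List.map_eq_nil_iff] at hmin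
        exact hp1ne hmin
      | some m =>
        obtain ⟨it0, hit0, hit0e⟩ := List.mem_map.mp (PySem.List.min?_mem hmin)
        have hmins' : ∀ it ∈ p1, m ≤ max it.2 1 := fun it hit =>
          PySem.List.min?_isMin hmin _ (List.mem_map_of_mem hit)
        have hm1 : (1 : Int) ≤ m := by rw [← hit0e]; exact le_max_right _ _
        have hit0le : it0.2 ≤ m := by rw [← hit0e]; exact le_max_left _ _
        have hfinlen : 0 < (finJ m p1).length :=
          List.length_pos_of_ne_nil (finJ_ne m p1 it0 hit0 hit0le)
        have hsfl := surv_fin_len m p1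
        rw [evLoop]
        simp only [if_pos hguard, hrk', hmin]
        have hkk : enumA (k + (kk : Int)) rest = enumA (k + (taken.length : Int)) rest := by
          cases hr : rest with
          | nil => simp [enumA]
          | cons a b =>
            have hlt : kk < (t :: ts0).length := by
              by_contra hctr
              push Not at hctr
              have hre : rest = [] := by
                rw [hrestdef]
                exact List.drop_eq_nil_of_le hctr
              rw [hr] at hre
              cases hre
            have : taken.length = kk := by
              rw [htakendef, List.length_take]
              omega
            rw [this]
        rw [hkk]
        -- recursive call
        have hih := ih (rest.length + (survJ m p1).length)
          (by
            have h1 : (survJ m p1).length < p1.length := by omega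
            omega)
          rest (k + (taken.length : Int)) (T + m) (survJ m p1) free'
          (ev ++ (finJ m p1).map (fun i => (T + m, i))) fB
          rfl
          (by simp only [List.length_append, List.length_map]
              omega)
          (by omega)
          (by have : (survJ m p1).length ≤ p1.length := by omega
              omega)
          (by
            intro hrest
            have hr1ne : enumA (k + (taken.length : Int)) rest ≠ [] := by
              intro hnil
              have := congrArg List.length hnil
              rw [enum_length] at this
              simp at this
              exact hrest this
            have hpost := refillA_post N (enumA k (t :: ts0)) p
            rw [hrk'] at hpost
            rcases hpost with hpost | hpost
            · exfalso
              rw [hkk] at hpost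
              exact hr1ne hpost
            · have hpost' : ¬ ((p1.length : Int) < N) := by simpa using hpost
              have hp1eq : (p1.length : Int) = N := by omega
              have hNM : N ≤ ((M : Nat) : Int) := by
                have h1 : p1.length ≤ cnt := by
                  rw [hp1len]
                  simp only [← hlen]
                  omega
                omega
              have hfleq : (free.length : Int) = N := by
                rw [hflInt, min_eq_left hNM]
              have hpads0 : pads.length - taken.length = 0 := by omega
              constructor
              · have := hperm'.length_eq
                simp only [List.length_append, List.length_map, List.length_replicate,
                  enum_length, hpads0] at this
                rw [← hfl]
                omega
              · refine ⟨List.replicate (finJ m p1).length (T + m), ?_, ?_⟩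
                · rw [hpads0] at hperm'
                  simp only [List.replicate_zero, List.append_nil] at hperm'
                  have hp1vals : p.map (fun it => T + max it.2 1)
                      ++ (enumA k taken).map (fun it => T + max it.2 1)
                      = p1.map (fun it => T + max it.2 1) := by
                    rw [hp1def, List.map_append]
                  rw [hp1vals] at hperm'
                  refine hperm'.trans ?_
                  refine (splitVals T m hm1 p1 hmins').trans ?_
                  exact List.perm_append_comm
                · intro x hx
                  exact (List.mem_replicate.mp hx).2)
        refine hih.trans ?_
        rw [← hta, heq]
        simp only [List.append_assoc]
        refine List.Perm.append_left ev ?_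
        have h3 := (splitEvents T m hm1 p1 hmins').symm.append_right
          (schedB free' (k + (taken.length : Int)) rest)
        simpa [List.append_assoc, hp1def, List.map_append] using h3

-- the event-driven view emits its events in strictly increasing (time, index) order
theorem survJ_map_fst (m : Int) (l : List (Int × Int)) :
    (survJ m l).map Prod.fst = (l.filter (fun it => !decide (it.2 ≤ m))).map Prod.fst := by
  simp [survJ, List.map_map]

theorem evSorted (N : Int) (M : Nat) :
    ∀ (fuel : Nat) (T : Int) (q p ev : List (Int × Int)),
    ((p.map Prod.fst ++ q.map Prod.fst)).Pairwise (· < ·) →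
    ev.Pairwise (fun a b => toLex a < toLex b) →
    (∀ e ∈ ev, e.1 ≤ T) →
    (evLoop N M fuel T q p ev).Pairwise (fun a b => toLex a < toLex b) := by
  intro fuel
  induction fuel with
  | zero => intro T q p ev _ hev _; exact hev
  | succ f ih =>
    intro T q p ev hidx hev hbnd
    rw [evLoop]
    by_cases hg : ev.length < M
    · rw [if_pos hg]
      obtain ⟨kk, hrk⟩ := refillA_shape N q p
      cases hmin : PySem.List.min? ((p ++ q.take kk).map (fun it => max it.2 1)) (fun x => x) with
      | none => simp only [hrk, hmin]; exact hev
      | some m =>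
        simp only [hrk, hmin]
        obtain ⟨it0, hit0, hit0e⟩ := List.mem_map.mp (PySem.List.min?_mem hmin)
        have hm1 : (1 : Int) ≤ m := by rw [← hit0e]; exact le_max_right _ _
        have hbig : ((p ++ q.take kk).map Prod.fst ++ (q.drop kk).map Prod.fst).Pairwise (· < ·) := by
          have : (p ++ q.take kk).map Prod.fst ++ (q.drop kk).map Prod.fst
              = p.map Prod.fst ++ q.map Prod.fst := by
            rw [List.map_append, List.append_assoc, ← List.map_append, List.take_append_drop]
          rw [this]; exact hidx
        have hpfst : ((p ++ q.take kk).map Prod.fst).Pairwise (· < ·) :=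
          (List.pairwise_append.mp hbig).1
        apply ih
        · -- indices of survivors ++ rest of queue
          refine List.Pairwise.sublist ?_ hbig
          rw [survJ_map_fst]
          exact List.Sublist.append
            (List.Sublist.map Prod.fst List.filter_sublist) (List.Sublist.refl _)
        · -- new accumulator pairwise
          rw [List.pairwise_append]
          refine ⟨hev, ?_, ?_⟩
          · have hfinp : (finJ m (p ++ q.take kk)).Pairwise (· < ·) := by
              refine List.Pairwise.sublist ?_ hpfst
              exact List.Sublist.map Prod.fst List.filter_sublist
            refine List.Pairwise.map _ ?_ hfinp
            intro a b hab
            rw [Prod.Lex.toLex_lt_toLex]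
            exact Or.inr ⟨rfl, hab⟩
          · intro a ha b hb
            obtain ⟨i, _, rfl⟩ := List.mem_map.mp hb
            rw [Prod.Lex.toLex_lt_toLex]
            left
            have := hbnd a ha
            simp only
            omega
        · intro e he
          rcases List.mem_append.mp he with he | he
          · have := hbnd e he; omega
          · obtain ⟨i, _, rfl⟩ := List.mem_map.mp he
            simp
    · rw [if_neg hg]; exact hev

-- with N = 1 the event view retires one item per event, in queue order
theorem evLoop_one (M : Nat) :
    ∀ (q : List (Int × Int)) (ev : List (Int × Int)) (fuel : Nat) (T : Int),
    q.length < fuel → ev.length + q.length = M →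
    (evLoop 1 M fuel T q [] ev).map Prod.snd = ev.map Prod.snd ++ q.map Prod.fst := by
  intro q
  induction q with
  | nil =>
    intro ev fuel T hf hM
    obtain ⟨f, rfl⟩ : ∃ f, fuel = f + 1 := ⟨fuel - 1, by omega⟩
    have hng : ¬ (ev.length < M) := by simp at hM; omega
    simp [evLoop, hng]
  | cons x q ih =>
    intro ev fuel T hf hM
    obtain ⟨f, rfl⟩ : ∃ f, fuel = f + 1 := ⟨fuel - 1, by omega⟩
    have hg : ev.length < M := by simp at hM; omega
    have hre : refillA 1 (x :: q) [] = (q, [x]) := by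
      simp only [refillA, List.length_nil]
      rw [if_pos (by omega), List.nil_append,
        refillA_noop 1 q [x] (Or.inr (by simp))]
    have hmin : PySem.List.min? ([max x.2 1] : List Int) (fun y => y)
        = some (max x.2 1) := by
      rw [PySem.List.min?_id_cons, List.foldl_nil]
    have hfx : finJ (max x.2 1) [x] = [x.1] := by simp [finJ]
    have hsx : survJ (max x.2 1) [x] = [] := by simp [survJ]
    conv_lhs => rw [evLoop]
    simp only [if_pos hg, hre, hmin, hfx, hsx, List.map_cons, List.map_nil]
    rw [ih (ev ++ [(T + max x.2 1, x.1)]) f (T + max x.2 1)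
      (by simp at hf ⊢; omega) (by simp at hM ⊢; omega)]
    simp

-- ===== VERDICT (by name: the statement is the Claim_ definition above) =====
theorem solution_spec : Claim_equal_solution := by
  unfold Claim_equal_solution
  intro N cts _ hpre
  unfold Spec_solution solution solution_alt
  by_cases hN : 1 ≤ N
  · -- B's sorted schedule equals the event-driven view of A's simulation
    have hperm := evPerm N cts.length hN cts.length cts 1 0 []
      (List.replicate (min N ((cts.length : Nat) : Int)).toNat 0) [] (cts.length + 1)
      (by simp) (by simp) (by omega) (by simp; omega)
      (by
        intro _
        refine ⟨by simp, ⟨List.replicate (min N ((cts.length : Nat) : Int)).toNat 0, by simp, ?_⟩⟩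
        intro x hx
        exact List.eq_of_mem_replicate hx)
    have hsorted := evSorted N cts.length (cts.length + 1) 0 (enumA 1 cts) [] []
      (by simpa using enumA_fst_pairwise 1 cts) (by simp) (by simp)
    have hB : PySem.List.sorted
        (schedB (List.replicate (min N ((cts.length : Nat) : Int)).toNat 0) 1 cts)
        (fun e => toLex e)
        = evLoop N cts.length (cts.length + 1) 0 (enumA 1 cts) [] [] :=
      PySem.List.sorted_eq_of_perm_of_pairwise_lt _ _ _ (by simpa using hperm) hsorted
    rw [hB]
    by_cases hN1 : N = 1
    · subst hN1
      rw [if_pos (by simp)]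
      rw [evLoop_one cts.length (enumA 1 cts) [] (cts.length + 1) 0
        (by rw [enum_length]; omega) (by rw [enum_length]; simp)]
      rw [List.map_nil, List.nil_append, enum_fst]
      simp [add_comm]
    · rw [if_neg (by simpa using hN1)]
      have := mainLoop N cts.length hN cts.length (enumA 1 cts) [] [] 0
        ((cts.map (fun t => (max t 1).toNat)).sum + 1) (cts.length + 1)
        (by rw [enum_length]; simp) (by simp) (by omega)
        (by rw [sumE_enum]; simp [sumE])
      simpa using this
  · -- N ≤ 0: Pre_solution forces the empty list
    rcases hpre with h | h
    · omega
    · subst h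
      rw [if_neg (by simp; omega)]
      simp only [enumA, List.length_nil, List.map_nil, List.sum_nil]
      rw [show schedB (List.replicate (min N ((0 : Nat) : Int)).toNat 0) 1 [] = []
          from rfl]
      rw [(PySem.List.sorted_eq_nil_iff _ _ _).mpr rfl]
      simp [loopA]
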